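-- pv_equiv track=rewrite | github.com/xiongyuchuan3294/api-data-gen | api-data-gen/src/api_data_gen/services/ai_data_generation_service.py | _split_compact_fields
-- ===== SOURCE A (Python) =====
-- def _split_compact_fields(line: str, max_parts: int) -> list[str]:
--     parts: list[str] = []
--     current: list[str] = []
--     escape = False
--     for char in line:
--         if escape:
--             current.append(char)
--             escape = False
--             continue
--         if char == "\\":
--             escape = True
--             continue
--         if char == "|" and len(parts) < max_parts - 1:
--             parts.append("".join(current).strip())
--             current = []
--             continue
--         current.append(char)
--     parts.append("".join(current).strip())
--     return parts
-- ===== SOURCE B (Python) =====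
-- def _unescape_strip(s: str) -> str:
--     """Remove the backslash before each escaped char, drop a trailing lone backslash, then strip."""
--     out = []
--     i = 0
--     while i < len(s):
--         if s[i] == "\\":
--             if i + 1 < len(s):
--                 out.append(s[i + 1])
--             i += 2
--         else:
--             out.append(s[i])
--             i += 1
--     return "".join(out).strip()
--
--
-- def _split_compact_fields(line: str, max_parts: int) -> list[str]:
--     # Phase 1: full split on unescaped pipes, keeping escape sequences raw.
--     raw: list[str] = []
--     cur: list[str] = []
--     esc = False
--     for ch in line:
--         if esc:
--             cur.append("\\")
--             cur.append(ch)
--             esc = False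
--         elif ch == "\\":
--             esc = True
--         elif ch == "|":
--             raw.append("".join(cur))
--             cur = []
--         else:
--             cur.append(ch)
--     if esc:
--         cur.append("\\")
--     raw.append("".join(cur))
--     # Phase 2: cap at max_parts fields by rejoining the overflow on '|'.
--     k = max(max_parts - 1, 0)
--     if len(raw) > k + 1:
--         raw = raw[:k] + ["|".join(raw[k:])]
--     # Phase 3: unescape and strip each field.
--     return [_unescape_strip(f) for f in raw]
-- ===== Notes on version B (the rewrite author's own statement) =====
-- stated objective: alternative
-- what changed: Replaces A's single interleaved state machine (which unescapes, strips and enforces the max_parts cap inside one loop) by a three-phase pipeline: full raw split on unescaped pipes, then cap by rejoining the overflow fields on '|', then an unescape+strip pass over each field.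
import Mathlib
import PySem

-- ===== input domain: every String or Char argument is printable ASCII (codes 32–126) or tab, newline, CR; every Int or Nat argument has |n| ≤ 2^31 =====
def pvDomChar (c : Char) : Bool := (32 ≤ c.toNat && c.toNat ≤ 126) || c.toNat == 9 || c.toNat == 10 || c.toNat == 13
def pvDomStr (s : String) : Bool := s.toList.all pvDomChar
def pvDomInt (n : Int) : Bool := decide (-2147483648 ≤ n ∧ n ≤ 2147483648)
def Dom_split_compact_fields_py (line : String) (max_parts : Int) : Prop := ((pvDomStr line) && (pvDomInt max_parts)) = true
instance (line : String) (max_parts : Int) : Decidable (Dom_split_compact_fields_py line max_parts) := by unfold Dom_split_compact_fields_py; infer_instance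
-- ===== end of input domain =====

-- B replaces A's capped interleaved state machine by a three-phase pipeline (full raw split
-- on unescaped pipes, then cap by rejoining the overflow on '|', then unescape+strip each
-- field); objective: alternative/idiomatic, same cost.

-- ===== PORT A =====
-- one iteration of A's for-loop over the state (parts, current, escape)
def pvStepA (max_parts : Int) (st : List String × List Char × Bool) (c : Char) :
    List String × List Char × Bool :=
  match st with
  | (parts, current, escape) =>
    if escape then (parts, current ++ [c], false)
    else if c = '\\' then (parts, current, true)
    else if c = '|' ∧ (parts.length : Int) < max_parts - 1 then
      (parts ++ [String.ofList (PySem.Chars.strip current)], ([] : List Char), false)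
    else (parts, current ++ [c], false)

def split_compact_fields_py (line : String) (max_parts : Int) : List String :=
  let st := line.toList.foldl (pvStepA max_parts) ([], [], false)
  st.1 ++ [String.ofList (PySem.Chars.strip st.2.1)]

-- ===== PORT B =====
-- _unescape_strip's while-loop: drop the backslash of each escape pair, drop a trailing lone backslash
def pvUnesc : List Char → List Char
  | [] => []
  | [c] => if c = '\\' then [] else [c]
  | c :: d :: rest => if c = '\\' then d :: pvUnesc rest else c :: pvUnesc (d :: rest)

def pvField (f : List Char) : String := String.ofList (PySem.Chars.strip (pvUnesc f))

-- "|".join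
def pvJoin : List (List Char) → List Char
  | [] => []
  | [x] => x
  | x :: y :: xs => x ++ '|' :: pvJoin (y :: xs)

-- phase-1 loop: raw split on unescaped pipes; state (finished raw fields, current raw field, escape)
def pvStepB (st : List (List Char) × List Char × Bool) (c : Char) :
    List (List Char) × List Char × Bool :=
  match st with
  | (acc, cur, esc) =>
    if esc then (acc, cur ++ ['\\', c], false)
    else if c = '\\' then (acc, cur, true)
    else if c = '|' then (acc ++ [cur], ([] : List Char), false)
    else (acc, cur ++ [c], false)

def split_compact_fields_py_alt (line : String) (max_parts : Int) : List String :=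
  let st := line.toList.foldl pvStepB ([], [], false)
  let lastRaw := if st.2.2 then st.2.1 ++ ['\\'] else st.2.1
  let raw := st.1 ++ [lastRaw]
  let k := (max (max_parts - 1) 0).toNat
  let raw' := if raw.length > k + 1 then raw.take k ++ [pvJoin (raw.drop k)] else raw
  raw'.map pvField

-- ===== PRECONDITION & SPEC =====
def Spec_split_compact_fields_py (line : String) (max_parts : Int) (out : List String) : Prop := out = split_compact_fields_py_alt line max_parts
instance (line : String) (max_parts : Int) (out : List String) : Decidable (Spec_split_compact_fields_py line max_parts out) := by unfold Spec_split_compact_fields_py; infer_instance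

-- ===== CLAIM (what is proved, stated in full; the proofs are below) =====
def Claim_equal_split_compact_fields_py : Prop := ∀ (line : String) (max_parts : Int), Dom_split_compact_fields_py line max_parts → Spec_split_compact_fields_py line max_parts (split_compact_fields_py line max_parts)

-- ===== LEMMAS AND PROOFS =====

-- step-equation lemmas for the two loop bodies
theorem pvStepA_esc (mp : Int) (p : List String) (cu : List Char) (c : Char) :
    pvStepA mp (p, cu, true) c = (p, cu ++ [c], false) := rfl

theorem pvStepA_bs (mp : Int) (p : List String) (cu : List Char) :
    pvStepA mp (p, cu, false) '\\' = (p, cu, true) := by simp [pvStepA]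

theorem pvStepA_pipe_pos (mp : Int) (p : List String) (cu : List Char)
    (h : (p.length : Int) < mp - 1) :
    pvStepA mp (p, cu, false) '|' =
      (p ++ [String.ofList (PySem.Chars.strip cu)], ([] : List Char), false) := by
  simp [pvStepA, h]

theorem pvStepA_pipe_neg (mp : Int) (p : List String) (cu : List Char)
    (h : ¬ (p.length : Int) < mp - 1) :
    pvStepA mp (p, cu, false) '|' = (p, cu ++ ['|'], false) := by
  simp [pvStepA, h]

theorem pvStepA_chr (mp : Int) (p : List String) (cu : List Char) (c : Char)
    (hbs : c ≠ '\\') (hp : c ≠ '|') :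
    pvStepA mp (p, cu, false) c = (p, cu ++ [c], false) := by
  simp [pvStepA, hbs, hp]

theorem pvStepB_esc (a : List (List Char)) (cu : List Char) (c : Char) :
    pvStepB (a, cu, true) c = (a, cu ++ ['\\', c], false) := rfl

theorem pvStepB_bs (a : List (List Char)) (cu : List Char) :
    pvStepB (a, cu, false) '\\' = (a, cu, true) := by simp [pvStepB]

theorem pvStepB_pipe (a : List (List Char)) (cu : List Char) :
    pvStepB (a, cu, false) '|' = (a ++ [cu], ([] : List Char), false) := by
  simp [pvStepB]

theorem pvStepB_chr (a : List (List Char)) (cu : List Char) (c : Char)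
    (hbs : c ≠ '\\') (hp : c ≠ '|') :
    pvStepB (a, cu, false) c = (a, cu ++ [c], false) := by
  simp [pvStepB, hbs, hp]

-- "pair-complete": every backslash opens a complete escape pair
inductive pvPC : List Char → Prop
  | nil : pvPC []
  | esc (c : Char) (xs : List Char) : pvPC xs → pvPC ('\\' :: c :: xs)
  | chr (c : Char) (xs : List Char) : c ≠ '\\' → pvPC xs → pvPC (c :: xs)

theorem pvUnesc_nil : pvUnesc [] = [] := rfl

theorem pvUnesc_esc (c : Char) (t : List Char) : pvUnesc ('\\' :: c :: t) = c :: pvUnesc t := by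
  simp [pvUnesc]

theorem pvUnesc_chr (c : Char) (t : List Char) (h : c ≠ '\\') :
    pvUnesc (c :: t) = c :: pvUnesc t := by
  cases t <;> simp [pvUnesc, h]

theorem pvPC_append {xs ys : List Char} (hx : pvPC xs) (hy : pvPC ys) : pvPC (xs ++ ys) := by
  induction hx with
  | nil => simpa using hy
  | esc c t _ ih => exact pvPC.esc c _ ih
  | chr c t hc _ ih => exact pvPC.chr c _ hc ih

theorem pvUnesc_append {xs : List Char} (ys : List Char) (hx : pvPC xs) :
    pvUnesc (xs ++ ys) = pvUnesc xs ++ pvUnesc ys := by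
  induction hx with
  | nil => simp [pvUnesc_nil]
  | esc c t _ ih => simp [pvUnesc_esc, ih]
  | chr c t hc _ ih => simp [pvUnesc_chr _ _ hc, ih]

theorem pvUnesc_trail {xs : List Char} (hx : pvPC xs) : pvUnesc (xs ++ ['\\']) = pvUnesc xs := by
  rw [pvUnesc_append _ hx]; simp [pvUnesc]

theorem pvJoin_nonempty_snoc (l : List (List Char)) (z : List Char) (h : l ≠ []) :
    pvJoin (l ++ [z]) = pvJoin l ++ '|' :: z := by
  induction l with
  | nil => exact absurd rfl h
  | cons x xs ih =>
    cases xs with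
    | nil => simp [pvJoin]
    | cons y ys =>
      show x ++ '|' :: pvJoin ((y :: ys) ++ [z]) = (x ++ '|' :: pvJoin (y :: ys)) ++ '|' :: z
      rw [ih (by simp)]
      simp

theorem pvJoin_last_append (l : List (List Char)) (y z : List Char) :
    pvJoin (l ++ [y ++ z]) = pvJoin (l ++ [y]) ++ z := by
  induction l with
  | nil => simp [pvJoin]
  | cons x xs ih =>
    cases xs with
    | nil => simp [pvJoin]
    | cons w ws =>
      show x ++ '|' :: pvJoin ((w :: ws) ++ [y ++ z]) = (x ++ '|' :: pvJoin ((w :: ws) ++ [y])) ++ z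
      rw [ih]
      simp

theorem pvPC_join {l : List (List Char)} (h : ∀ f ∈ l, pvPC f) : pvPC (pvJoin l) := by
  induction l with
  | nil => exact pvPC.nil
  | cons x xs ih =>
    cases xs with
    | nil => exact h x (by simp)
    | cons y ys =>
      refine pvPC_append (h x (by simp)) ?_
      exact pvPC.chr '|' _ (by decide) (ih (fun f hf => h f (by simp [hf])))

-- the abstraction from B's phase-1 state to A's state
def pvCurRaw (k : Nat) (acc : List (List Char)) (cur : List Char) : List Char :=
  pvJoin (acc.drop k ++ [cur])

def pvParts (k : Nat) (acc : List (List Char)) : List String :=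
  (acc.take k).map pvField

theorem pvPC_curRaw {k : Nat} {acc : List (List Char)} {cur : List Char}
    (ha : ∀ f ∈ acc, pvPC f) (hc : pvPC cur) : pvPC (pvCurRaw k acc cur) := by
  refine pvPC_join (fun f hf => ?_)
  rcases List.mem_append.1 hf with h | h
  · exact ha f (List.mem_of_mem_drop h)
  · simpa [List.mem_singleton.1 h] using hc

theorem pvCond_iff (max_parts : Int) (n : Nat) :
    ((n : Int) < max_parts - 1) ↔ n < (max (max_parts - 1) 0).toNat := by
  omega

-- one step of the two loops commutes with the abstraction
theorem pvStep_comm (max_parts : Int) (c : Char) (acc : List (List Char)) (cur : List Char)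
    (esc : Bool) (ha : ∀ f ∈ acc, pvPC f) (hc : pvPC cur) :
    pvStepA max_parts
        (pvParts ((max (max_parts - 1) 0).toNat) acc,
         pvUnesc (pvCurRaw ((max (max_parts - 1) 0).toNat) acc cur), esc) c =
      (pvParts ((max (max_parts - 1) 0).toNat) (pvStepB (acc, cur, esc) c).1,
       pvUnesc (pvCurRaw ((max (max_parts - 1) 0).toNat) (pvStepB (acc, cur, esc) c).1
          (pvStepB (acc, cur, esc) c).2.1),
       (pvStepB (acc, cur, esc) c).2.2) := by
  set k := (max (max_parts - 1) 0).toNat with hk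
  have hPCraw : pvPC (pvJoin (acc.drop k ++ [cur])) := pvPC_curRaw ha hc
  cases esc with
  | true =>
    rw [pvStepA_esc, pvStepB_esc]
    refine Prod.ext rfl (Prod.ext ?_ rfl)
    show pvUnesc (pvCurRaw k acc cur) ++ [c] = pvUnesc (pvCurRaw k acc (cur ++ ['\\', c]))
    simp only [pvCurRaw]
    rw [pvJoin_last_append (acc.drop k) cur ['\\', c], pvUnesc_append ['\\', c] hPCraw,
        pvUnesc_esc c [], pvUnesc_nil]
  | false =>
    by_cases hbs : c = '\\'
    · subst hbs; rw [pvStepA_bs, pvStepB_bs]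
    · by_cases hp : c = '|'
      · subst hp
        rw [pvStepB_pipe]
        by_cases hlt : acc.length < k
        · -- still room: A splits off a field, B closes a raw field
          have hcond : ((pvParts k acc).length : Int) < max_parts - 1 := by
            rw [pvCond_iff max_parts, ← hk]
            simp only [pvParts, List.length_map, List.length_take]
            omega
          rw [pvStepA_pipe_pos _ _ _ hcond]
          have hdrop : acc.drop k = [] := List.drop_eq_nil_of_le (by omega)
          have hdrop' : (acc ++ [cur]).drop k = [] := List.drop_eq_nil_of_le (by simp; omega)
          have htake : (acc ++ [cur]).take k = acc ++ [cur] :=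
            List.take_of_length_le (by simp; omega)
          have htake' : acc.take k = acc := List.take_of_length_le (by omega)
          refine Prod.ext ?_ (Prod.ext ?_ rfl)
          · show pvParts k acc ++ [String.ofList (PySem.Chars.strip (pvUnesc (pvCurRaw k acc cur)))] =
              pvParts k (acc ++ [cur])
            simp [pvParts, pvCurRaw, hdrop, htake, htake', pvJoin, pvField]
          · show ([] : List Char) = pvUnesc (pvCurRaw k (acc ++ [cur]) [])
            simp [pvCurRaw, hdrop', pvJoin, pvUnesc_nil]
        · -- cap reached: A keeps the '|' in current, B still closes a raw field
          have hcond : ¬ ((pvParts k acc).length : Int) < max_parts - 1 := by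
            rw [pvCond_iff max_parts, ← hk]
            simp only [pvParts, List.length_map, List.length_take]
            omega
          rw [pvStepA_pipe_neg _ _ _ hcond]
          have hkle : k ≤ acc.length := by omega
          have htake : (acc ++ [cur]).take k = acc.take k :=
            List.take_append_of_le_length hkle
          have hdrop : (acc ++ [cur]).drop k = acc.drop k ++ [cur] :=
            List.drop_append_of_le_length hkle
          refine Prod.ext ?_ (Prod.ext ?_ rfl)
          · simp [pvParts, htake]
          · show pvUnesc (pvCurRaw k acc cur) ++ ['|'] = pvUnesc (pvCurRaw k (acc ++ [cur]) [])
            simp only [pvCurRaw, hdrop]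
            conv_rhs => rw [pvJoin_nonempty_snoc (List.drop k acc ++ [cur]) [] (by simp)]
            rw [pvUnesc_append ('|' :: []) hPCraw,
                pvUnesc_chr '|' [] (by decide), pvUnesc_nil]
      · -- ordinary character: both append it to the current field
        rw [pvStepA_chr _ _ _ _ hbs hp, pvStepB_chr _ _ _ hbs hp]
        refine Prod.ext rfl (Prod.ext ?_ rfl)
        show pvUnesc (pvCurRaw k acc cur) ++ [c] = pvUnesc (pvCurRaw k acc (cur ++ [c]))
        simp only [pvCurRaw]
        rw [pvJoin_last_append (acc.drop k) cur [c], pvUnesc_append [c] hPCraw,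
            pvUnesc_chr c [] hbs, pvUnesc_nil]

-- the invariant is preserved by one step of B's loop
theorem pvInv_step (c : Char) (acc : List (List Char)) (cur : List Char) (esc : Bool)
    (ha : ∀ f ∈ acc, pvPC f) (hc : pvPC cur) :
    (∀ f ∈ (pvStepB (acc, cur, esc) c).1, pvPC f) ∧ pvPC (pvStepB (acc, cur, esc) c).2.1 := by
  cases esc with
  | true =>
    rw [pvStepB_esc]
    exact ⟨ha, by simpa using pvPC_append hc (pvPC.esc c [] pvPC.nil)⟩
  | false =>
    by_cases hbs : c = '\\'
    · subst hbs; rw [pvStepB_bs]; exact ⟨ha, hc⟩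
    · by_cases hp : c = '|'
      · subst hp
        rw [pvStepB_pipe]
        refine ⟨fun f hf => ?_, pvPC.nil⟩
        rcases List.mem_append.1 hf with h | h
        · exact ha f h
        · simpa [List.mem_singleton.1 h] using hc
      · rw [pvStepB_chr _ _ _ hbs hp]
        exact ⟨ha, by simpa using pvPC_append hc (pvPC.chr c [] hbs pvPC.nil)⟩

-- A's loop is B's loop seen through the abstraction
theorem pvLoop_eq (max_parts : Int) (cs : List Char) :
    ∀ (acc : List (List Char)) (cur : List Char) (esc : Bool),
      (∀ f ∈ acc, pvPC f) → pvPC cur →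
      cs.foldl (pvStepA max_parts)
          (pvParts ((max (max_parts - 1) 0).toNat) acc,
           pvUnesc (pvCurRaw ((max (max_parts - 1) 0).toNat) acc cur), esc) =
        (pvParts ((max (max_parts - 1) 0).toNat) (cs.foldl pvStepB (acc, cur, esc)).1,
         pvUnesc (pvCurRaw ((max (max_parts - 1) 0).toNat) (cs.foldl pvStepB (acc, cur, esc)).1
            (cs.foldl pvStepB (acc, cur, esc)).2.1),
         (cs.foldl pvStepB (acc, cur, esc)).2.2) := by
  induction cs with
  | nil => intro acc cur esc _ _; rfl
  | cons c cs ih =>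
    intro acc cur esc ha hc
    rw [List.foldl_cons, List.foldl_cons, pvStep_comm max_parts c acc cur esc ha hc]
    obtain ⟨h1, h2⟩ := pvInv_step c acc cur esc ha hc
    rcases hstep : pvStepB (acc, cur, esc) c with ⟨acc2, cur2, esc2⟩
    rw [hstep] at h1 h2
    exact ih acc2 cur2 esc2 h1 h2

-- the invariant holds after B's whole loop
theorem pvInv_foldl (cs : List Char) :
    ∀ (acc : List (List Char)) (cur : List Char) (esc : Bool),
      (∀ f ∈ acc, pvPC f) → pvPC cur →
      (∀ f ∈ (cs.foldl pvStepB (acc, cur, esc)).1, pvPC f) ∧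
        pvPC (cs.foldl pvStepB (acc, cur, esc)).2.1 := by
  induction cs with
  | nil => intro acc cur esc ha hc; exact ⟨ha, hc⟩
  | cons c cs ih =>
    intro acc cur esc ha hc
    obtain ⟨h1, h2⟩ := pvInv_step c acc cur esc ha hc
    rcases hstep : pvStepB (acc, cur, esc) c with ⟨acc2, cur2, esc2⟩
    rw [hstep] at h1 h2
    simpa [List.foldl_cons, hstep] using ih acc2 cur2 esc2 h1 h2

-- finalization: A's last append equals B's cap-and-map phases
theorem pvFinal (max_parts : Int) (acc : List (List Char)) (cur : List Char) (esc : Bool)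
    (ha : ∀ f ∈ acc, pvPC f) (hc : pvPC cur) :
    pvParts ((max (max_parts - 1) 0).toNat) acc ++
        [String.ofList (PySem.Chars.strip
          (pvUnesc (pvCurRaw ((max (max_parts - 1) 0).toNat) acc cur)))] =
      (if (acc ++ [if esc then cur ++ ['\\'] else cur]).length > (max (max_parts - 1) 0).toNat + 1 then
          (acc ++ [if esc then cur ++ ['\\'] else cur]).take ((max (max_parts - 1) 0).toNat) ++
            [pvJoin ((acc ++ [if esc then cur ++ ['\\'] else cur]).drop ((max (max_parts - 1) 0).toNat))]
        else acc ++ [if esc then cur ++ ['\\'] else cur]).map pvField := by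
  set k := (max (max_parts - 1) 0).toNat with hk
  have hPCraw : pvPC (pvJoin (acc.drop k ++ [cur])) := pvPC_curRaw ha hc
  have hcur' : pvUnesc (if esc then cur ++ ['\\'] else cur) = pvUnesc cur := by
    cases esc
    · rfl
    · simpa using pvUnesc_trail hc
  by_cases hlen : acc.length > k
  · have hlen' : (acc ++ [if esc then cur ++ ['\\'] else cur]).length > k + 1 := by simp; omega
    rw [if_pos hlen']
    have hkle : k ≤ acc.length := by omega
    rw [List.take_append_of_le_length hkle, List.drop_append_of_le_length hkle]
    have hraw : pvUnesc (pvJoin (acc.drop k ++ [if esc then cur ++ ['\\'] else cur])) =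
        pvUnesc (pvJoin (acc.drop k ++ [cur])) := by
      cases esc
      · rfl
      · show pvUnesc (pvJoin (acc.drop k ++ [cur ++ ['\\']])) = _
        rw [pvJoin_last_append]
        exact pvUnesc_trail hPCraw
    simp only [List.map_append, List.map_cons, List.map_nil, pvParts, pvCurRaw, pvField, hraw]
  · have hlen' : ¬ (acc ++ [if esc then cur ++ ['\\'] else cur]).length > k + 1 := by simp; omega
    rw [if_neg hlen']
    have htake : acc.take k = acc := List.take_of_length_le (by omega)
    have hdrop : acc.drop k = [] := List.drop_eq_nil_of_le (by omega)
    simp only [List.map_append, List.map_cons, List.map_nil, pvParts, pvCurRaw, htake, hdrop,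
      List.nil_append, pvJoin, pvField, hcur']

-- ===== VERDICT (by name: the statement is the Claim_ definition above) =====
theorem split_compact_fields_py_spec : Claim_equal_split_compact_fields_py := by
  unfold Claim_equal_split_compact_fields_py
  intro line max_parts _
  unfold Spec_split_compact_fields_py split_compact_fields_py split_compact_fields_py_alt
  have hinit : (([] : List String), ([] : List Char), false) =
      (pvParts ((max (max_parts - 1) 0).toNat) [],
       pvUnesc (pvCurRaw ((max (max_parts - 1) 0).toNat) [] []), false) := by
    simp [pvParts, pvCurRaw, pvJoin, pvUnesc]
  rw [hinit, pvLoop_eq max_parts line.toList [] [] false (by simp) pvPC.nil]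
  obtain ⟨h1, h2⟩ := pvInv_foldl line.toList [] [] false (by simp) pvPC.nil
  rcases hst : line.toList.foldl pvStepB ([], [], false) with ⟨acc, cur, esc⟩
  rw [hst] at h1 h2
  simpa using pvFinal max_parts acc cur esc h1 h2
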